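-- pv_equiv track=rewrite | github.com/dsuarezmarra/spellloop | utils/process_fire_wand.py | is_checkerboard_gray
-- ===== SOURCE A (Python) =====
-- def is_checkerboard_gray(r, g, b, a):
--     """Detectar si es el gris del tablero de ajedrez"""
--     if a < 200:  # Si ya es transparente, no es tablero
--         return False
--
--     # Grises del tablero de ajedrez (normalmente ~128 y ~192, o ~153 y ~204)
--     gray_values = [128, 153, 154, 192, 204, 205]
--     tolerance = 15
--
--     # Verificar si es gris (R ≈ G ≈ B)
--     if abs(r - g) < 10 and abs(g - b) < 10:
--         for gray in gray_values:
--             if abs(r - gray) < tolerance: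
--                 return True
--
--     return False
-- ===== SOURCE B (Python) =====
-- def is_checkerboard_gray(r, g, b, a):
--     """Detectar si es el gris del tablero de ajedrez (interval form)."""
--     return (a >= 200
--             and abs(r - g) < 10 and abs(g - b) < 10
--             and (113 < r < 169 or 177 < r < 220))
-- ===== Notes on version B (the rewrite author's own statement) =====
-- stated objective: simpler
-- what changed: Replaced the loop over six gray values with tolerance 15 by a single boolean expression testing membership in the two merged open intervals (113,169) and (177,220).
import Mathlib
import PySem

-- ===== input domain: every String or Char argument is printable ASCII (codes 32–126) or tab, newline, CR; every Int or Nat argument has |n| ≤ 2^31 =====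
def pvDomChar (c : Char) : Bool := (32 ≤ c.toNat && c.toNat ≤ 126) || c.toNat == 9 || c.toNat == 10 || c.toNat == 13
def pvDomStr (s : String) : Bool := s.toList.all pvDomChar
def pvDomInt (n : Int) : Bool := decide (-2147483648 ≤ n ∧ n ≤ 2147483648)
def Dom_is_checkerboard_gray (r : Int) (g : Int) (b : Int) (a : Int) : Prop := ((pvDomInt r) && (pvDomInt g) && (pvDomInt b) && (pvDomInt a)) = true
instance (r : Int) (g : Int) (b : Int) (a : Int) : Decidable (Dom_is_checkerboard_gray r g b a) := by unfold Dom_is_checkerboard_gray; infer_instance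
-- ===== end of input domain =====

-- ===== PORT A =====
-- B replaces A's six-value tolerance loop with two merged open intervals; return values equal everywhere.
def is_checkerboard_gray (r : Int) (g : Int) (b : Int) (a : Int) : Bool :=
  if a < 200 then false
  else
    let gray_values : List Int := [128, 153, 154, 192, 204, 205]
    let tolerance : Int := 15
    if |r - g| < 10 && |g - b| < 10 then
      gray_values.foldl (fun acc gray => acc || decide (|r - gray| < tolerance)) false
    else false

-- ===== PORT B =====
def is_checkerboard_gray_alt (r : Int) (g : Int) (b : Int) (a : Int) : Bool :=
  a ≥ 200 && |r - g| < 10 && |g - b| < 10 &&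
    ((113 < r && r < 169) || (177 < r && r < 220))

-- ===== PRECONDITION & SPEC =====
def Spec_is_checkerboard_gray (r : Int) (g : Int) (b : Int) (a : Int) (out : Bool) : Prop := out = is_checkerboard_gray_alt r g b a
instance (r : Int) (g : Int) (b : Int) (a : Int) (out : Bool) : Decidable (Spec_is_checkerboard_gray r g b a out) := by unfold Spec_is_checkerboard_gray; infer_instance

-- ===== CLAIM (what is proved, stated in full; the proofs are below) =====
def Claim_equal_is_checkerboard_gray : Prop := ∀ (r : Int) (g : Int) (b : Int) (a : Int), Dom_is_checkerboard_gray r g b a → Spec_is_checkerboard_gray r g b a (is_checkerboard_gray r g b a)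

-- ===== LEMMAS AND PROOFS =====

-- ===== VERDICT (by name: the statement is the Claim_ definition above) =====
theorem is_checkerboard_gray_spec : Claim_equal_is_checkerboard_gray := by
  intro r g b a _
  unfold Spec_is_checkerboard_gray is_checkerboard_gray is_checkerboard_gray_alt
  simp only [List.foldl, Bool.false_or, abs_lt, ge_iff_le]
  split_ifs <;>
    simp only [abs_lt] at * <;>
    rw [Bool.eq_iff_iff] <;>
    simp_all only [Bool.or_eq_true, Bool.and_eq_true, decide_eq_true_eq, Bool.false_eq_true,
      false_iff, not_or, not_and, true_and, and_true] <;>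
    omega
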